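-- pv_equiv track=rewrite | github.com/tattoo1976/cs2_server_controller | controller.py | _buy_tier
-- ===== SOURCE A (Python) =====
-- def _buy_tier(weapons: set[str]) -> str:
--     if not weapons:
--         return "unknown"
--     normalized = {w.lower() for w in weapons}
--     full_buy = {
--         "ak47", "m4a1", "m4a1_silencer", "m4a4", "famas", "galilar",
--         "aug", "sg556", "awp", "scar20", "g3sg1",
--     }
--     force_weapons = {
--         "mp9", "mac10", "ump45", "mp7", "mp5sd", "p90", "bizon",
--         "nova", "xm1014", "mag7", "sawedoff",
--         "deagle", "revolver", "five_seven", "tec9", "cz75a",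
--     }
--     pistols = {
--         "glock", "hkp2000", "p250", "elite", "usp_silencer", "fiveseven",
--         "tec9", "cz75a", "deagle", "revolver",
--     }
--     utility = {"hegrenade", "smokegrenade", "flashbang", "molotov", "incgrenade", "knife", "taser"}
--
--     if normalized & full_buy:
--         return "full"
--     if normalized & force_weapons:
--         return "force"
--     if normalized.issubset(pistols | utility):
--         return "pistol"
--     return "eco"
-- ===== SOURCE B (Python) =====
-- # ranks: pistols/utility=1, force=2, full=3; force-overlap names (deagle etc.) are in the force tier
-- _TIER_DATA = (
--     "glock hkp2000 p250 elite usp_silencer fiveseven"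
--     " hegrenade smokegrenade flashbang molotov incgrenade knife taser",
--     "mp9 mac10 ump45 mp7 mp5sd p90 bizon nova xm1014 mag7 sawedoff"
--     " deagle revolver five_seven tec9 cz75a",
--     "ak47 m4a1 m4a1_silencer m4a4 famas galilar aug sg556 awp scar20 g3sg1",
-- )
-- _RANK = {name: rank for rank, names in enumerate(_TIER_DATA, 1) for name in names.split()}
--
--
-- def _buy_tier(weapons: set[str]) -> str:
--     if not weapons:
--         return "unknown"
--     hi, lo = 0, 3
--     for w in weapons:
--         r = _RANK.get(w.lower(), 0)
--         if r > hi: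
--             hi = r
--         if r < lo:
--             lo = r
--     if hi == 3:
--         return "full"
--     if hi == 2:
--         return "force"
--     return "pistol" if lo >= 1 else "eco"
-- ===== Notes on version B (the rewrite author's own statement) =====
-- stated objective: alternative
-- what changed: Replaces the four hard-coded category sets and the cascade of set-intersection/subset tests with a rank table built from three whitespace-separated tier strings (pistol/utility=1, force=2, full=3, unknown=0) and one explicit loop tracking the max and min rank, from which the tier is read off.
import Mathlib
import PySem

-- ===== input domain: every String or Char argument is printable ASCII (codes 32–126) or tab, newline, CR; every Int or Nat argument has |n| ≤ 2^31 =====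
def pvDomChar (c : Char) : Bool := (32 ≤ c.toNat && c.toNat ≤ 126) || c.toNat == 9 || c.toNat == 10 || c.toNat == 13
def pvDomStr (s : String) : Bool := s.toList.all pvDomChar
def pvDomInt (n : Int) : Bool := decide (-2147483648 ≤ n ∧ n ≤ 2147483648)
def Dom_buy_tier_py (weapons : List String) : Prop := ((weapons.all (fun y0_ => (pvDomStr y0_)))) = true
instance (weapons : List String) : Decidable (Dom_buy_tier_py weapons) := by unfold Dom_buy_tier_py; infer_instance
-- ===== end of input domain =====

-- B replaces A's four category sets and cascaded set tests by a rank table built from three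
-- tier strings and one max/min accumulator loop; same return value on every input (no mutation).

-- ===== PORT A =====
def pvFullBuyA : PySem.Set String := PySem.Set.ofList
  ["ak47", "m4a1", "m4a1_silencer", "m4a4", "famas", "galilar",
   "aug", "sg556", "awp", "scar20", "g3sg1"]

def pvForceA : PySem.Set String := PySem.Set.ofList
  ["mp9", "mac10", "ump45", "mp7", "mp5sd", "p90", "bizon",
   "nova", "xm1014", "mag7", "sawedoff",
   "deagle", "revolver", "five_seven", "tec9", "cz75a"]

def pvPistolsA : PySem.Set String := PySem.Set.ofList
  ["glock", "hkp2000", "p250", "elite", "usp_silencer", "fiveseven",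
   "tec9", "cz75a", "deagle", "revolver"]

def pvUtilityA : PySem.Set String := PySem.Set.ofList
  ["hegrenade", "smokegrenade", "flashbang", "molotov", "incgrenade", "knife", "taser"]

def buy_tier_py (weapons : List String) : String :=
  if weapons = [] then "unknown"
  else
    let normalized : PySem.Set String := PySem.Set.ofList (weapons.map PySem.Str.lower)
    if PySem.Set.inter normalized pvFullBuyA ≠ [] then "full"
    else if PySem.Set.inter normalized pvForceA ≠ [] then "force"
    else if PySem.Set.issubset normalized (PySem.Set.union pvPistolsA pvUtilityA) then "pistol"
    else "eco"

-- ===== PORT B =====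
-- the three tier strings of Source B (pistol/utility, force, full); ranks 1, 2, 3 in this order
def pvTierData : List String :=
  ["glock hkp2000 p250 elite usp_silencer fiveseven hegrenade smokegrenade flashbang molotov incgrenade knife taser",
   "mp9 mac10 ump45 mp7 mp5sd p90 bizon nova xm1014 mag7 sawedoff deagle revolver five_seven tec9 cz75a",
   "ak47 m4a1 m4a1_silencer m4a4 famas galilar aug sg556 awp scar20 g3sg1"]

-- dict comprehension over enumerate(_TIER_DATA, 1) and names.split()
def pvRankB : PySem.Dict String Nat :=
  (pvTierData.zipIdx 1).foldl
    (fun d p => (PySem.Str.split₀ p.1).foldl (fun d name => d.insert name p.2) d)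
    PySem.Dict.empty

-- the for-loop of Source B: running max (hi) and min (lo) of the ranks
def pvTierGo : List String → Nat → Nat → Nat × Nat
  | [], hi, lo => (hi, lo)
  | w :: ws, hi, lo =>
      let r := pvRankB.getD (PySem.Str.lower w) 0
      pvTierGo ws (if hi < r then r else hi) (if r < lo then r else lo)

def buy_tier_py_alt (weapons : List String) : String :=
  if weapons = [] then "unknown"
  else
    let hl := pvTierGo weapons 0 3
    if hl.1 = 3 then "full"
    else if hl.1 = 2 then "force"
    else if 1 ≤ hl.2 then "pistol"
    else "eco"

-- ===== PRECONDITION & SPEC =====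
def Spec_buy_tier_py (weapons : List String) (out : String) : Prop := out = buy_tier_py_alt weapons
instance (weapons : List String) (out : String) : Decidable (Spec_buy_tier_py weapons out) := by unfold Spec_buy_tier_py; infer_instance

-- ===== CLAIM (what is proved, stated in full; the proofs are below) =====
def Claim_equal_buy_tier_py : Prop := ∀ (weapons : List String), Dom_buy_tier_py weapons → Spec_buy_tier_py weapons (buy_tier_py weapons)

-- ===== LEMMAS AND PROOFS =====

-- the three category lists, named for the proofs (elements of the tier strings / of A's sets)
def pvPUL : List String :=
  ["glock", "hkp2000", "p250", "elite", "usp_silencer", "fiveseven",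
   "hegrenade", "smokegrenade", "flashbang", "molotov", "incgrenade", "knife", "taser"]

def pvForceL : List String :=
  ["mp9", "mac10", "ump45", "mp7", "mp5sd", "p90", "bizon",
   "nova", "xm1014", "mag7", "sawedoff",
   "deagle", "revolver", "five_seven", "tec9", "cz75a"]

def pvFullL : List String :=
  ["ak47", "m4a1", "m4a1_silencer", "m4a4", "famas", "galilar",
   "aug", "sg556", "awp", "scar20", "g3sg1"]

def pvPistolsL : List String :=
  ["glock", "hkp2000", "p250", "elite", "usp_silencer", "fiveseven",
   "tec9", "cz75a", "deagle", "revolver"]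

def pvUtilityL : List String :=
  ["hegrenade", "smokegrenade", "flashbang", "molotov", "incgrenade", "knife", "taser"]

-- pvRankB evaluates (key-disjoint inserts in order) to a concrete block association list
set_option maxRecDepth 100000 in
theorem pv_rankB_eval :
    pvRankB = PySem.Dict.mk (pvPUL.map (fun s => (s, 1)) ++ pvForceL.map (fun s => (s, 2))
      ++ pvFullL.map (fun s => (s, 3))) := by decide

-- first-match lookup in a constant-valued block of an association-list dict
theorem pv_getD_mk_block (r : Nat) (l : List String) (rest : List (String × Nat)) (w : String) :
    (PySem.Dict.mk (l.map (fun s => (s, r)) ++ rest)).getD w 0 =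
      if w ∈ l then r else (PySem.Dict.mk rest).getD w 0 := by
  induction l with
  | nil => simp
  | cons a t ih =>
    simp only [List.map_cons, List.cons_append, List.mem_cons]
    rw [PySem.Dict.getD_eq_get?_getD, PySem.Dict.get?_mk_cons]
    by_cases h : a = w
    · simp [h]
    · have hne : (a == w) = false := by simp [h]
      have hwa : ¬ (w = a) := fun hw => h hw.symm
      rw [hne]
      simp only [Bool.false_eq_true, if_false]
      rw [← PySem.Dict.getD_eq_get?_getD, ih]
      simp [hwa]

-- the rank of a (lowercased) weapon name, characterised by the three category lists
theorem pv_rank_char (w : String) :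
    pvRankB.getD w 0 =
      if w ∈ pvPUL then 1 else if w ∈ pvForceL then 2
      else if w ∈ pvFullL then 3 else 0 := by
  rw [pv_rankB_eval]
  have h3 := pv_getD_mk_block 3 pvFullL [] w
  rw [List.append_nil] at h3
  rw [List.append_assoc, pv_getD_mk_block, pv_getD_mk_block, h3]
  have h0 : (PySem.Dict.mk ([] : List (String × Nat))).getD w 0 = 0 := rfl
  rw [h0]

-- the loop pvTierGo computes exactly the max/min folds of the rank list
set_option maxRecDepth 100000 in
theorem pv_tierGo_eq (ws : List String) (hi lo : Nat) :
    pvTierGo ws hi lo =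
      ((ws.map (fun w => pvRankB.getD (PySem.Str.lower w) 0)).foldl max hi,
       (ws.map (fun w => pvRankB.getD (PySem.Str.lower w) 0)).foldl min lo) := by
  induction ws generalizing hi lo with
  | nil => simp [pvTierGo]
  | cons w t ih =>
    simp only [pvTierGo, List.map_cons, List.foldl_cons]
    rw [ih]
    congr 1
    · congr 1; split_ifs <;> omega
    · congr 1; split_ifs <;> omega

theorem pv_le_foldl_max_iff (l : List Nat) (a k : Nat) :
    k ≤ l.foldl max a ↔ k ≤ a ∨ ∃ x ∈ l, k ≤ x := by
  induction l generalizing a with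
  | nil => simp
  | cons b t ih =>
    simp only [List.foldl_cons, ih, le_max_iff, List.mem_cons]
    constructor
    · rintro ((h | h) | ⟨x, hx, hk⟩)
      · exact Or.inl h
      · exact Or.inr ⟨b, Or.inl rfl, h⟩
      · exact Or.inr ⟨x, Or.inr hx, hk⟩
    · rintro (h | ⟨x, hx, hk⟩)
      · exact Or.inl (Or.inl h)
      · rcases hx with rfl | hx
        · exact Or.inl (Or.inr hk)
        · exact Or.inr ⟨x, hx, hk⟩

theorem pv_foldl_max_le_iff (l : List Nat) (a k : Nat) :
    l.foldl max a ≤ k ↔ a ≤ k ∧ ∀ x ∈ l, x ≤ k := by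
  induction l generalizing a with
  | nil => simp
  | cons b t ih =>
    simp only [List.foldl_cons, ih, max_le_iff, List.mem_cons]
    constructor
    · rintro ⟨⟨ha, hb⟩, ht⟩
      exact ⟨ha, fun x hx => hx.elim (fun h => h ▸ hb) (ht x)⟩
    · rintro ⟨ha, ht⟩
      exact ⟨⟨ha, ht b (Or.inl rfl)⟩, fun x hx => ht x (Or.inr hx)⟩

theorem pv_le_foldl_min_iff (l : List Nat) (a k : Nat) :
    k ≤ l.foldl min a ↔ k ≤ a ∧ ∀ x ∈ l, k ≤ x := by
  induction l generalizing a with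
  | nil => simp
  | cons b t ih =>
    simp only [List.foldl_cons, ih, le_min_iff, List.mem_cons]
    constructor
    · rintro ⟨⟨ha, hb⟩, ht⟩
      exact ⟨ha, fun x hx => hx.elim (fun h => h ▸ hb) (ht x)⟩
    · rintro ⟨ha, ht⟩
      exact ⟨⟨ha, ht b (Or.inl rfl)⟩, fun x hx => ht x (Or.inr hx)⟩

theorem pv_foldl_max_zero_eq (l : List Nat) (k : Nat) (hk : 0 < k) :
    l.foldl max 0 = k ↔ (∀ x ∈ l, x ≤ k) ∧ ∃ x ∈ l, k ≤ x := by
  constructor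
  · intro h
    refine ⟨((pv_foldl_max_le_iff l 0 k).1 h.le).2, ?_⟩
    rcases (pv_le_foldl_max_iff l 0 k).1 h.ge with h0 | hx
    · omega
    · exact hx
  · rintro ⟨hle, hex⟩
    have h1 : l.foldl max 0 ≤ k := (pv_foldl_max_le_iff l 0 k).2 ⟨Nat.zero_le _, hle⟩
    have h2 : k ≤ l.foldl max 0 := (pv_le_foldl_max_iff l 0 k).2 (Or.inr hex)
    omega

-- the three category lists are pairwise disjoint (checked on the literals)
theorem pv_pu_notfull : ∀ x ∈ pvPUL, x ∉ pvFullL := by decide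
theorem pv_force_notfull : ∀ x ∈ pvForceL, x ∉ pvFullL := by decide
theorem pv_pu_notforce : ∀ x ∈ pvPUL, x ∉ pvForceL := by decide

theorem pv_rank_ge3_iff (w : String) : 3 ≤ pvRankB.getD w 0 ↔ w ∈ pvFullL := by
  rw [pv_rank_char]
  split_ifs with h1 h2 h3
  · exact iff_of_false (by omega) (pv_pu_notfull w h1)
  · exact iff_of_false (by omega) (pv_force_notfull w h2)
  · exact iff_of_true (by omega) h3
  · exact iff_of_false (by omega) h3

theorem pv_rank_ge2_iff (w : String) :
    2 ≤ pvRankB.getD w 0 ↔ w ∈ pvFullL ∨ w ∈ pvForceL := by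
  rw [pv_rank_char]
  split_ifs with h1 h2 h3
  · exact iff_of_false (by omega)
      (fun h => h.elim (pv_pu_notfull w h1) (pv_pu_notforce w h1))
  · exact iff_of_true (by omega) (Or.inr h2)
  · exact iff_of_true (by omega) (Or.inl h3)
  · exact iff_of_false (by omega) (fun h => h.elim h3 h2)

theorem pv_rank_ge1_iff (w : String) :
    1 ≤ pvRankB.getD w 0 ↔ w ∈ pvFullL ∨ w ∈ pvForceL ∨ w ∈ pvPUL := by
  rw [pv_rank_char]
  split_ifs with h1 h2 h3
  · exact iff_of_true (by omega) (Or.inr (Or.inr h1))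
  · exact iff_of_true (by omega) (Or.inr (Or.inl h2))
  · exact iff_of_true (by omega) (Or.inl h3)
  · exact iff_of_false (by omega) (fun h => h.elim h3 (fun h => h.elim h2 h1))

theorem pv_rank_le_three (w : String) : pvRankB.getD w 0 ≤ 3 := by
  rw [pv_rank_char]; split_ifs <;> omega

-- category bookkeeping between A's lists and B's lists (finitely many literals)
theorem pv_pu_sub : ∀ x ∈ pvPUL, x ∈ pvPistolsL ∨ x ∈ pvUtilityL := by decide
theorem pv_pistols_cover : ∀ x ∈ pvPistolsL, x ∈ pvForceL ∨ x ∈ pvPUL := by decide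
theorem pv_utility_cover : ∀ x ∈ pvUtilityL, x ∈ pvForceL ∨ x ∈ pvPUL := by decide

-- ===== VERDICT (by name: the statement is the Claim_ definition above) =====
theorem buy_tier_py_spec : Claim_equal_buy_tier_py := by
  intro weapons _
  unfold Spec_buy_tier_py buy_tier_py buy_tier_py_alt
  by_cases hnil : weapons = []
  · simp [hnil]
  · simp only [if_neg hnil]
    rw [pv_tierGo_eq]
    set L := weapons.map (fun w => pvRankB.getD (PySem.Str.lower w) 0) with hL
    have hub : ∀ x ∈ L, x ≤ 3 := by
      intro x hx
      rcases List.mem_map.1 hx with ⟨u, _, rfl⟩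
      exact pv_rank_le_three _
    -- A-side condition characterisations
    have hA3 : (PySem.Set.ofList (weapons.map PySem.Str.lower)).inter pvFullBuyA ≠ [] ↔
        ∃ w ∈ weapons, PySem.Str.lower w ∈ pvFullL := by
      rw [Ne, List.eq_nil_iff_forall_not_mem]
      push Not
      constructor
      · rintro ⟨y, hy⟩
        rw [PySem.Set.mem_inter, PySem.Set.mem_ofList] at hy
        rcases hy with ⟨hy1, hy2⟩
        rcases List.mem_map.1 hy1 with ⟨w, hw, rfl⟩
        exact ⟨w, hw, (PySem.Set.mem_ofList _ _).1 hy2⟩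
      · rintro ⟨w, hw, hmem⟩
        refine ⟨PySem.Str.lower w, ?_⟩
        rw [PySem.Set.mem_inter, PySem.Set.mem_ofList]
        exact ⟨List.mem_map_of_mem hw, (PySem.Set.mem_ofList _ _).2 hmem⟩
    have hA2 : (PySem.Set.ofList (weapons.map PySem.Str.lower)).inter pvForceA ≠ [] ↔
        ∃ w ∈ weapons, PySem.Str.lower w ∈ pvForceL := by
      rw [Ne, List.eq_nil_iff_forall_not_mem]
      push Not
      constructor
      · rintro ⟨y, hy⟩
        rw [PySem.Set.mem_inter, PySem.Set.mem_ofList] at hy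
        rcases hy with ⟨hy1, hy2⟩
        rcases List.mem_map.1 hy1 with ⟨w, hw, rfl⟩
        exact ⟨w, hw, (PySem.Set.mem_ofList _ _).1 hy2⟩
      · rintro ⟨w, hw, hmem⟩
        refine ⟨PySem.Str.lower w, ?_⟩
        rw [PySem.Set.mem_inter, PySem.Set.mem_ofList]
        exact ⟨List.mem_map_of_mem hw, (PySem.Set.mem_ofList _ _).2 hmem⟩
    have hA1 : (PySem.Set.ofList (weapons.map PySem.Str.lower)).issubset
          (PySem.Set.union pvPistolsA pvUtilityA) = true ↔
        ∀ w ∈ weapons, PySem.Str.lower w ∈ pvPistolsL ∨ PySem.Str.lower w ∈ pvUtilityL := by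
      rw [PySem.Set.issubset_iff]
      constructor
      · intro h w hw
        have hm := h (PySem.Str.lower w)
          ((PySem.Set.mem_ofList _ _).2 (List.mem_map_of_mem hw))
        rw [PySem.Set.mem_union,
          show pvPistolsA = PySem.Set.ofList pvPistolsL from rfl,
          show pvUtilityA = PySem.Set.ofList pvUtilityL from rfl,
          PySem.Set.mem_ofList, PySem.Set.mem_ofList] at hm
        exact hm
      · intro h y hy
        rw [PySem.Set.mem_ofList] at hy
        rcases List.mem_map.1 hy with ⟨w, hw, rfl⟩
        rw [PySem.Set.mem_union,
          show pvPistolsA = PySem.Set.ofList pvPistolsL from rfl,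
          show pvUtilityA = PySem.Set.ofList pvUtilityL from rfl,
          PySem.Set.mem_ofList, PySem.Set.mem_ofList]
        exact h w hw
    -- main case analysis on which weapon categories are present in the input
    by_cases h3 : ∃ w ∈ weapons, PySem.Str.lower w ∈ pvFullL
    · have hB3 : L.foldl max 0 = 3 := by
        rcases h3 with ⟨w, hw, hmem⟩
        rw [pv_foldl_max_zero_eq _ _ (by omega)]
        exact ⟨hub, ⟨pvRankB.getD (PySem.Str.lower w) 0,
          List.mem_map_of_mem hw, (pv_rank_ge3_iff _).2 hmem⟩⟩
      rw [if_pos (hA3.mpr h3), if_pos hB3]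
    · have hnf : ∀ w ∈ weapons, PySem.Str.lower w ∉ pvFullL := by
        intro w hw hmem; exact h3 ⟨w, hw, hmem⟩
      have hB3 : ¬ L.foldl max 0 = 3 := by
        intro h
        rcases ((pv_foldl_max_zero_eq _ _ (by omega)).1 h).2 with ⟨x, hx, hk⟩
        rcases List.mem_map.1 hx with ⟨w, hw, rfl⟩
        exact hnf w hw ((pv_rank_ge3_iff _).1 hk)
      rw [if_neg (fun h => h3 (hA3.mp h)), if_neg hB3]
      by_cases h2 : ∃ w ∈ weapons, PySem.Str.lower w ∈ pvForceL
      · have hB2 : L.foldl max 0 = 2 := by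
          rw [pv_foldl_max_zero_eq _ _ (by omega)]
          constructor
          · intro x hx
            rcases List.mem_map.1 hx with ⟨w, hw, rfl⟩
            have h32 := pv_rank_le_three (PySem.Str.lower w)
            have hn3 : ¬ 3 ≤ pvRankB.getD (PySem.Str.lower w) 0 :=
              fun hc => hnf w hw ((pv_rank_ge3_iff _).1 hc)
            omega
          · rcases h2 with ⟨w, hw, hmem⟩
            exact ⟨pvRankB.getD (PySem.Str.lower w) 0, List.mem_map_of_mem hw,
              (pv_rank_ge2_iff _).2 (Or.inr hmem)⟩
        rw [if_pos (hA2.mpr h2), if_pos hB2]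
      · have hnr : ∀ w ∈ weapons, PySem.Str.lower w ∉ pvForceL := by
          intro w hw hmem; exact h2 ⟨w, hw, hmem⟩
        have hB2 : ¬ L.foldl max 0 = 2 := by
          intro h
          rcases ((pv_foldl_max_zero_eq _ _ (by omega)).1 h).2 with ⟨x, hx, hk⟩
          rcases List.mem_map.1 hx with ⟨w, hw, rfl⟩
          rcases (pv_rank_ge2_iff _).1 hk with hc | hc
          · exact hnf w hw hc
          · exact hnr w hw hc
        rw [if_neg (fun h => h2 (hA2.mp h)), if_neg hB2]
        -- remaining branch: pistol vs eco
        have hlo : 1 ≤ L.foldl min 3 ↔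
            ∀ w ∈ weapons, PySem.Str.lower w ∈ pvPistolsL ∨ PySem.Str.lower w ∈ pvUtilityL := by
          rw [pv_le_foldl_min_iff]
          constructor
          · rintro ⟨-, h⟩ w hw
            have h1 := h _ (List.mem_map_of_mem hw)
            rcases (pv_rank_ge1_iff _).1 h1 with hc | hc | hc
            · exact absurd hc (hnf w hw)
            · exact absurd hc (hnr w hw)
            · exact pv_pu_sub _ hc
          · intro h
            refine ⟨by omega, ?_⟩
            intro x hx
            rcases List.mem_map.1 hx with ⟨w, hw, rfl⟩
            rw [pv_rank_ge1_iff]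
            rcases h w hw with hc | hc
            · rcases pv_pistols_cover _ hc with hd | hd
              · exact absurd hd (hnr w hw)
              · exact Or.inr (Or.inr hd)
            · rcases pv_utility_cover _ hc with hd | hd
              · exact absurd hd (hnr w hw)
              · exact Or.inr (Or.inr hd)
        by_cases h1 : ∀ w ∈ weapons, PySem.Str.lower w ∈ pvPistolsL ∨ PySem.Str.lower w ∈ pvUtilityL
        · rw [if_pos (hA1.mpr h1), if_pos (hlo.mpr h1)]
        · rw [if_neg (fun h => h1 (hA1.mp h)), if_neg (fun h => h1 (hlo.mp h))]
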